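-- pv_equiv track=rewrite | github.com/aguslugea/SINTAXIS_TP_1 | lexer.py | automata_simbolos
-- ===== SOURCE A (Python) =====
-- ESTADO_TRAMPA = "TRAMPA"
--
-- ESTADO_FINAL = "ACEPTADO"
--
-- ESTADO_NO_FINAL = "NO ACEPTADO"
--
-- def condicion_cadena(estado_actual1, estados_finaless):
--
--     if estado_actual1 == -1:
--         return ESTADO_TRAMPA
--     if estado_actual1 in estados_finaless:
--         return ESTADO_FINAL
--     else:
--         return ESTADO_NO_FINAL
--
-- def automata_simbolos(cadena):
--     simbolos = ["*", "+"]
--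
--     estado_actual = 0
--     estados_finales = [1]
--
--     for caracter in cadena:
--         if estado_actual == 0 and caracter in simbolos:
--             estado_actual = 1
--         else:
--             estado_actual = - 1
--             break
--
--     return condicion_cadena(estado_actual, estados_finales)
-- ===== SOURCE B (Python) =====
-- ESTADO_TRAMPA = "TRAMPA"
-- ESTADO_FINAL = "ACEPTADO"
-- ESTADO_NO_FINAL = "NO ACEPTADO"
--
-- def automata_simbolos(cadena):
--     items = list(cadena)
--     if not items:
--         return ESTADO_NO_FINAL
--     if len(items) == 1 and items[0] in ("*", "+"):
--         return ESTADO_FINAL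
--     return ESTADO_TRAMPA
-- ===== Notes on version B (the rewrite author's own statement) =====
-- stated objective: simpler
-- what changed: Replaces the per-character DFA transition loop (with break and final-state lookup) by a single closed-form length/membership classification of the materialised character list.
import Mathlib
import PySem

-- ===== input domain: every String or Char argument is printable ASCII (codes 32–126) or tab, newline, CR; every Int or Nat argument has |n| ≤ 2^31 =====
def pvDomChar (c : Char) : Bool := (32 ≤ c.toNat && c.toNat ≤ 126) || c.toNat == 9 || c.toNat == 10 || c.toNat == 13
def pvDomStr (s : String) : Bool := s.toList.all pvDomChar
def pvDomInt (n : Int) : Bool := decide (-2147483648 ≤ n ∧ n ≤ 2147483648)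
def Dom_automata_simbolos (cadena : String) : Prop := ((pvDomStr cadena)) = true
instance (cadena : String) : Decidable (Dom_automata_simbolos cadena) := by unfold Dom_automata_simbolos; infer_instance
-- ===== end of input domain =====

-- B differs from A structurally (closed-form classification vs DFA loop); equivalence is exact, no Pre_ needed (A is total).

-- ===== PORT A =====
def pvEstadoTrampa : String := "TRAMPA"
def pvEstadoFinal : String := "ACEPTADO"
def pvEstadoNoFinal : String := "NO ACEPTADO"

def condicion_cadena (estado_actual1 : Int) (estados_finaless : List Int) : String :=
  if estado_actual1 = -1 then pvEstadoTrampa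
  else if estados_finaless.contains estado_actual1 then pvEstadoFinal
  else pvEstadoNoFinal

-- the for-loop with break, over the characters of cadena
def automataLoop (chars : List Char) (estado_actual : Int) (simbolos : List Char) : Int :=
  match chars with
  | [] => estado_actual
  | c :: rest =>
    if estado_actual = 0 ∧ simbolos.contains c then
      automataLoop rest 1 simbolos
    else
      -1  -- break after setting estado_actual = -1

def automata_simbolos (cadena : String) : String :=
  condicion_cadena (automataLoop cadena.toList 0 ['*', '+']) [1]

-- ===== PORT B =====
def automata_simbolos_alt (cadena : String) : String :=
  let items := cadena.toList
  if items.isEmpty then "NO ACEPTADO"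
  else if items.length = 1 ∧ (items.headI = '*' ∨ items.headI = '+') then "ACEPTADO"
  else "TRAMPA"

-- ===== PRECONDITION & SPEC =====
def Spec_automata_simbolos (cadena : String) (out : String) : Prop := out = automata_simbolos_alt cadena
instance (cadena : String) (out : String) : Decidable (Spec_automata_simbolos cadena out) := by unfold Spec_automata_simbolos; infer_instance

-- ===== CLAIM (what is proved, stated in full; the proofs are below) =====
def Claim_equal_automata_simbolos : Prop := ∀ (cadena : String), Dom_automata_simbolos cadena → Spec_automata_simbolos cadena (automata_simbolos cadena)

-- ===== LEMMAS AND PROOFS =====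

theorem automata_agree (l : List Char) :
    condicion_cadena (automataLoop l 0 ['*', '+']) [1] =
      (if l.isEmpty then "NO ACEPTADO"
       else if l.length = 1 ∧ (l.headI = '*' ∨ l.headI = '+') then "ACEPTADO"
       else "TRAMPA") := by
  match l with
  | [] => rfl
  | [c] =>
    by_cases h : c = '*' ∨ c = '+' <;>
      simp [automataLoop, condicion_cadena, pvEstadoTrampa, pvEstadoFinal, pvEstadoNoFinal, h]
  | c :: d :: rest =>
    by_cases h : c = '*' ∨ c = '+' <;>
      simp [automataLoop, condicion_cadena, pvEstadoTrampa, h]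

-- ===== VERDICT (by name: the statement is the Claim_ definition above) =====
theorem automata_simbolos_spec : Claim_equal_automata_simbolos := by
  intro cadena _
  unfold Spec_automata_simbolos automata_simbolos automata_simbolos_alt
  exact automata_agree cadena.toList
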